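-- pv_equiv track=rewrite | github.com/pypi-data/pypi-mirror-342 | packages/fetchAZA/fetchaza-0.0.3.post1.dev0.tar.gz/fetchaza-0.0.3.post1.dev0/fetchAZA/readers.py | parse_header_data
-- ===== SOURCE A (Python) =====
-- def parse_header_data(lines, allowed_events=None):
--     """
--     Reads a CSV file and separates it into header and data lines, optionally filtering
--     by allowed event types.
--
--     Parameters
--     ----------
--     file_path : str
--         Path to the CSV file.
--     allowed_events : set, optional
--         A set of allowed event types. If provided, only lines with the first field
--         matching an allowed event type will be included. If None, all lines are included.
--
--     Returns
--     -------
--     tuple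
--         A tuple containing:
--         - header_lines (list of str): The header lines from the file.
--         - data_lines (list of str): The data lines from the file.
--     """
--     header_lines = []
--     data_lines = []
--     data_section = False
--
--     for line in lines:
--         line = line.strip()
--         if line.startswith("# Data"):
--             data_section = True
--             continue
--         if not data_section:
--             # Only keep header lines if allowed_events is None or the first field is in allowed_events.
--             if line:
--                 first_field = line.split(",")[0].strip()
--                 if allowed_events is None or first_field in allowed_events:
--                     header_lines.append(line)
--         else:
--             # Only keep data lines if allowed_events is None or the first field is in allowed_events.
--             if line:
--                 first_field = line.split(",")[0].strip()
--                 if allowed_events is None or first_field in allowed_events: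
--                     data_lines.append(line)
--
--     return header_lines, data_lines
-- ===== SOURCE B (Python) =====
-- def parse_header_data(lines, allowed_events=None):
--     stripped = [l.strip() for l in lines]
--     split_at = next((i for i, l in enumerate(stripped) if l.startswith("# Data")), len(stripped))
--
--     def keep(l):
--         if not l or l.startswith("# Data"):
--             return False
--         return allowed_events is None or l.split(",")[0].strip() in allowed_events
--
--     return ([l for l in stripped[:split_at] if keep(l)],
--             [l for l in stripped[split_at:] if keep(l)])
-- ===== Notes on version B (the rewrite author's own statement) =====
-- stated objective: alternative
-- what changed: Replaces A's single stateful loop with a data_section flag by: strip all lines once, locate the first '# Data' marker index, slice into header/data segments, and filter both with one shared keep predicate.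
import Mathlib
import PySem

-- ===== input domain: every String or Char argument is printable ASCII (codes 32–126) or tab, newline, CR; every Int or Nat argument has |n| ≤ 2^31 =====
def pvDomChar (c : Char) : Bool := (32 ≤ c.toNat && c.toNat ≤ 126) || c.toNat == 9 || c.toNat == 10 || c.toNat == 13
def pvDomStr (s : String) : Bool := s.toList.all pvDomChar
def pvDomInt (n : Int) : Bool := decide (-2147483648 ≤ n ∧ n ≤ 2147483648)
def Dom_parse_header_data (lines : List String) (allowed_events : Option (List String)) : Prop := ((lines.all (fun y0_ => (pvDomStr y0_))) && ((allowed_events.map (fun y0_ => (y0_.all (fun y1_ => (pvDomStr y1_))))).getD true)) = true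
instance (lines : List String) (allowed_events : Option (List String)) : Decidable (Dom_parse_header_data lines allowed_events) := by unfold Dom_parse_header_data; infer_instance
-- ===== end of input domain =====

-- B replaces A's stateful flag loop by: strip once, find the first '# Data' marker,
-- slice into two segments and filter both with one shared keep predicate (alternative decomposition, same cost).

-- ===== PORT A =====
-- one loop step of A: strips the line, handles the '# Data' marker, then appends to header or data
def phdStepA (allowed_events : Option (List String))
    (acc : List String × List String × Bool) (line : String) :
    List String × List String × Bool :=
  match acc with
  | (header, data, flag) =>
    let l := PySem.Str.strip line
    if PySem.Str.startswith l "# Data" then (header, data, true)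
    else if flag = false then
      if l ≠ "" then
        let ff := PySem.Str.strip (((PySem.Str.split? l ",").getD []).headD "")
        match allowed_events with
        | none => (header ++ [l], data, flag)
        | some evs => if evs.contains ff then (header ++ [l], data, flag) else (header, data, flag)
      else (header, data, flag)
    else
      if l ≠ "" then
        let ff := PySem.Str.strip (((PySem.Str.split? l ",").getD []).headD "")
        match allowed_events with
        | none => (header, data ++ [l], flag)
        | some evs => if evs.contains ff then (header, data ++ [l], flag) else (header, data, flag)
      else (header, data, flag)

def parse_header_data (lines : List String) (allowed_events : Option (List String)) : List String × List String :=
  let st := lines.foldl (phdStepA allowed_events) ([], [], false)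
  (st.1, st.2.1)

-- ===== PORT B =====
-- shared predicate: nonempty, not a '# Data' marker, and (if given) first field among allowed events
def phdKeep (allowed_events : Option (List String)) (l : String) : Bool :=
  if l = "" ∨ PySem.Str.startswith l "# Data" then false
  else
    match allowed_events with
    | none => true
    | some evs => evs.contains (PySem.Str.strip (((PySem.Str.split? l ",").getD []).headD ""))

def parse_header_data_alt (lines : List String) (allowed_events : Option (List String)) : List String × List String :=
  let stripped := lines.map PySem.Str.strip
  let splitAt := (stripped.findIdx? (fun l => PySem.Str.startswith l "# Data")).getD stripped.length
  ((stripped.take splitAt).filter (phdKeep allowed_events),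
   (stripped.drop splitAt).filter (phdKeep allowed_events))

-- ===== PRECONDITION & SPEC =====
def Spec_parse_header_data (lines : List String) (allowed_events : Option (List String)) (out : List String × List String) : Prop := out = parse_header_data_alt lines allowed_events
instance (lines : List String) (allowed_events : Option (List String)) (out : List String × List String) : Decidable (Spec_parse_header_data lines allowed_events out) := by unfold Spec_parse_header_data; infer_instance

-- ===== CLAIM (what is proved, stated in full; the proofs are below) =====
def Claim_equal_parse_header_data : Prop := ∀ (lines : List String) (allowed_events : Option (List String)), Dom_parse_header_data lines allowed_events → Spec_parse_header_data lines allowed_events (parse_header_data lines allowed_events)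

-- ===== LEMMAS AND PROOFS =====

-- one loop step of A, characterised through B's shared keep predicate
lemma phdStepA_eq (ae : Option (List String)) (h d : List String) (flag : Bool) (x : String) :
    phdStepA ae (h, d, flag) x =
      if PySem.Str.startswith (PySem.Str.strip x) "# Data" then (h, d, true)
      else if phdKeep ae (PySem.Str.strip x) then
        (if flag then (h, d ++ [PySem.Str.strip x], flag) else (h ++ [PySem.Str.strip x], d, flag))
      else (h, d, flag) := by
  cases flag <;> cases ae <;>
    simp only [phdStepA, phdKeep] <;>
    split_ifs <;> simp_all

-- once in the data section, the rest of A's loop is exactly a filter with phdKeep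
lemma phd_fold_true (ae : Option (List String)) (lines : List String) :
    ∀ h d, lines.foldl (phdStepA ae) (h, d, true)
      = (h, d ++ (lines.map PySem.Str.strip).filter (phdKeep ae), true) := by
  induction lines with
  | nil => simp
  | cons x xs ih =>
    intro h d
    simp only [List.foldl_cons, List.map_cons, List.filter_cons, phdStepA_eq]
    by_cases hs : PySem.Str.startswith (PySem.Str.strip x) "# Data" = true
    · have hk : phdKeep ae (PySem.Str.strip x) = false := by
        simp only [phdKeep]; rw [if_pos (Or.inr hs)]
      rw [if_pos hs, ih, hk]
      simp
    · rw [if_neg hs]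
      by_cases hk : phdKeep ae (PySem.Str.strip x) = true
      · rw [if_pos hk]
        simp only [if_true]
        rw [ih, hk]
        simp
      · rw [if_neg hk, ih]
        simp [Bool.eq_false_iff.mpr hk]

-- before the data section, A's loop splits at the first marker and filters both segments
lemma phd_fold_false (ae : Option (List String)) (lines : List String) :
    ∀ h d, lines.foldl (phdStepA ae) (h, d, false)
      = (h ++ ((lines.map PySem.Str.strip).take
            (((lines.map PySem.Str.strip).findIdx? (fun l => PySem.Str.startswith l "# Data")).getD lines.length)).filter (phdKeep ae),
         d ++ ((lines.map PySem.Str.strip).drop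
            (((lines.map PySem.Str.strip).findIdx? (fun l => PySem.Str.startswith l "# Data")).getD lines.length)).filter (phdKeep ae),
         ((lines.map PySem.Str.strip).findIdx? (fun l => PySem.Str.startswith l "# Data")).isSome) := by
  induction lines with
  | nil => simp
  | cons x xs ih =>
    intro h d
    simp only [List.foldl_cons, List.map_cons, List.length_cons, phdStepA_eq]
    by_cases hs : PySem.Str.startswith (PySem.Str.strip x) "# Data" = true
    · have hk : phdKeep ae (PySem.Str.strip x) = false := by
        simp only [phdKeep]; rw [if_pos (Or.inr hs)]
      rw [if_pos hs, phd_fold_true, List.findIdx?_cons, if_pos hs]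
      simp [hk]
    · have hfi : (((PySem.Str.strip x) :: xs.map PySem.Str.strip).findIdx?
          (fun l => PySem.Str.startswith l "# Data")).getD (xs.length + 1)
          = (((xs.map PySem.Str.strip).findIdx? (fun l => PySem.Str.startswith l "# Data")).getD xs.length) + 1 := by
        rw [List.findIdx?_cons, if_neg hs]
        cases hidx : (xs.map PySem.Str.strip).findIdx? (fun l => PySem.Str.startswith l "# Data") <;> simp
      have hiso : (((PySem.Str.strip x) :: xs.map PySem.Str.strip).findIdx?
          (fun l => PySem.Str.startswith l "# Data")).isSome
          = ((xs.map PySem.Str.strip).findIdx? (fun l => PySem.Str.startswith l "# Data")).isSome := by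
        rw [List.findIdx?_cons, if_neg hs]
        simp
      rw [if_neg hs, hfi, hiso]
      simp only [List.take_succ_cons, List.drop_succ_cons, List.filter_cons]
      by_cases hk : phdKeep ae (PySem.Str.strip x) = true
      · rw [if_pos hk, if_neg Bool.false_ne_true, ih, hk]
        simp
      · rw [if_neg hk, ih]
        simp [Bool.eq_false_iff.mpr hk]

-- ===== VERDICT (by name: the statement is the Claim_ definition above) =====
theorem parse_header_data_spec : Claim_equal_parse_header_data := by
  intro lines ae _
  show _ = _
  simp only [parse_header_data, parse_header_data_alt]
  rw [phd_fold_false ae lines [] []]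
  simp
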